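-- pv_equiv track=rewrite | github.com/ZiJun0502/ICCAD2024-Problem-A | src/post_optimizor.py | get_wire_declaration_str
-- ===== SOURCE A (Python) =====
-- def get_wire_declaration_str(wires):
--     """
--     Given a list of wire names,
--     return proper wire declaration lines for verilog file
--     """
--     wire_declaration_block = ""
--     if len(wires):
--         def chunk_list(lst, chunk_size):
--             for i in range(0, len(lst), chunk_size):
--                 yield lst[i:i + chunk_size]
--
--         # Generate the wire declaration block with a maximum of 10 nets per line
--         chunk_size = 30  # Maximum nets per line
--         wire_declaration_lines = [", ".join(chunk) for chunk in chunk_list(wires, chunk_size)]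
--         wire_declaration_block = "  wire " + ",\n    ".join(wire_declaration_lines) + ";\n"
--     return wire_declaration_block
-- ===== SOURCE B (Python) =====
-- def get_wire_declaration_str(wires):
--     """
--     Given a list of wire names,
--     return proper wire declaration lines for verilog file
--     """
--     body = ""
--     for i, w in enumerate(wires):
--         if i == 0:
--             body += w
--         elif i % 30 == 0:
--             body += ",\n    " + w
--         else:
--             body += ", " + w
--     if not wires:
--         return ""
--     return "  wire " + body + ";\n"
-- ===== Notes on version B (the rewrite author's own statement) =====
-- stated objective: simpler
-- what changed: Replaced the chunk generator plus two-level join with a single enumerate pass that appends each wire with a separator chosen from its index (newline at every 30th position).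
import Mathlib
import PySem

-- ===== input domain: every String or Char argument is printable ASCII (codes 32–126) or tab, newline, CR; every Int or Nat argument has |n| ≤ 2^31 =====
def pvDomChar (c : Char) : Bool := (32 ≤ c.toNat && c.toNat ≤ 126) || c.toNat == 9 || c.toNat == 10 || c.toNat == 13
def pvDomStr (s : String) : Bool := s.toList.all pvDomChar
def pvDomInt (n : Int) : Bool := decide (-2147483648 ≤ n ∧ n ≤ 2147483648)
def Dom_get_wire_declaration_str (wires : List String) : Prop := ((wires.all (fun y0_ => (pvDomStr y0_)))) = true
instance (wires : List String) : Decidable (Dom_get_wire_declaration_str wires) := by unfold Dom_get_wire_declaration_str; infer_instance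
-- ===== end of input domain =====

-- B replaces A's chunk generator and two-level join by one enumerate pass choosing each
-- wire's separator from its index; objective: simpler.

-- ===== PORT A =====
def get_wire_declaration_str (wires : List String) : String :=
  if wires.length ≠ 0 then
    "  wire " ++
      PySem.Str.join ",\n    "
        ((PySem.List.pyRange 0 (wires.length : Int) 30).map
          (fun i => PySem.Str.join ", " (PySem.List.slice wires (some i) (some (i + 30))))) ++
      ";\n"
  else ""

-- ===== PORT B =====
def get_wire_declaration_str_alt (wires : List String) : String :=
  let body := (PySem.List.enumerate wires 0).foldl
    (fun acc p =>
      if p.1 == 0 then acc ++ p.2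
      else if PySem.Int.mod p.1 30 == 0 then acc ++ ",\n    " ++ p.2
      else acc ++ ", " ++ p.2) ""
  if wires.isEmpty then "" else "  wire " ++ body ++ ";\n"

-- ===== PRECONDITION & SPEC =====
def Spec_get_wire_declaration_str (wires : List String) (out : String) : Prop := out = get_wire_declaration_str_alt wires
instance (wires : List String) (out : String) : Decidable (Spec_get_wire_declaration_str wires out) := by unfold Spec_get_wire_declaration_str; infer_instance

-- ===== CLAIM (what is proved, stated in full; the proofs are below) =====
def Claim_equal_get_wire_declaration_str : Prop := ∀ (wires : List String), Dom_get_wire_declaration_str wires → Spec_get_wire_declaration_str wires (get_wire_declaration_str wires)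

-- ===== LEMMAS AND PROOFS =====

-- separator B emits before the wire at (0-based) position k
def pvSep (k : Nat) : String := if k = 0 then "" else if k % 30 = 0 then ",\n    " else ", "

-- what B's loop appends for the suffix of wires starting at global position k
def pvG : Nat → List String → String
  | _, [] => ""
  | k, w :: ws => pvSep k ++ (w ++ pvG (k + 1) ws)

-- ", "-prefixed concatenation (the non-leading part of one line)
def pvRun : List String → String
  | [] => ""
  | x :: r => ", " ++ (x ++ pvRun r)

-- A's chunks, rendered: one joined line per 30 wires
def pvLines : List String → List String
  | [] => []
  | w :: t => PySem.Str.join ", " ((w :: t).take 30) :: pvLines ((w :: t).drop 30)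
  termination_by ws => ws.length
  decreasing_by simp

lemma join_cons_cons' (sep a b : String) (r : List String) :
    PySem.Str.join sep (a :: b :: r) = a ++ (sep ++ PySem.Str.join sep (b :: r)) := by
  simp [PySem.Str.join, PySem.Chars.join, List.intercalate]

lemma join_singleton' (sep a : String) : PySem.Str.join sep [a] = a := by
  simp [PySem.Str.join, PySem.Chars.join, List.intercalate]

lemma join_comma (l : List String) : ∀ w, PySem.Str.join ", " (w :: l) = w ++ pvRun l := by
  induction l with
  | nil => simp [join_singleton', pvRun]
  | cons x r ih =>
      intro w
      rw [join_cons_cons', ih x, pvRun]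

lemma foldB (ws : List String) : ∀ (k : Nat) (acc : String),
    (PySem.List.enumerate ws (k : Int)).foldl
      (fun acc p =>
        if p.1 == 0 then acc ++ p.2
        else if PySem.Int.mod p.1 30 == 0 then acc ++ ",\n    " ++ p.2
        else acc ++ ", " ++ p.2) acc = acc ++ pvG k ws := by
  induction ws with
  | nil => intro k acc; simp [PySem.List.enumerate_nil, pvG]
  | cons w t ih =>
      intro k acc
      rw [PySem.List.enumerate_cons]
      simp only [List.foldl_cons]
      have hmod : PySem.Int.mod (k : Int) 30 = ((k % 30 : Nat) : Int) := by
        simp [PySem.Int.mod, Int.fmod_eq_emod]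
      have hstep : (if ((k : Int) == 0) = true then acc ++ w
          else if (PySem.Int.mod (↑k) 30 == 0) = true then acc ++ ",\n    " ++ w
          else acc ++ ", " ++ w) = acc ++ (pvSep k ++ w) := by
        rw [hmod]
        by_cases h0 : k = 0
        · subst h0; simp [pvSep]
        · by_cases h30 : k % 30 = 0
          · simp [pvSep, h0, h30, String.append_assoc]
          · simp [pvSep, h0, h30, String.append_assoc]
            omega
      rw [show (k : Int) + 1 = ((k + 1 : Nat) : Int) by push_cast; ring, ih, hstep]
      simp [pvG, String.append_assoc]

lemma run (m : Nat) : ∀ (t : List String) (k : Nat), 0 < k % 30 → k % 30 + m = 30 →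
    pvG k t = pvRun (t.take m) ++ pvG (k + m) (t.drop m) := by
  induction m with
  | zero => intro t k h1 h2; omega
  | succ m ih =>
      intro t k h1 h2
      cases t with
      | nil => simp [pvG, pvRun]
      | cons x r =>
          have hsep : pvSep k = ", " := by
            unfold pvSep
            rw [if_neg (by omega), if_neg (by omega)]
          rcases Nat.eq_zero_or_pos m with hm | hm
          · subst hm
            have h29 : k % 30 = 29 := by omega
            simp [pvG, pvRun, hsep, String.append_assoc]
          · have hk1 : (k + 1) % 30 = k % 30 + 1 := by omega
            rw [pvG, hsep, ih r (k + 1) (by omega) (by omega)]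
            simp [pvRun, String.append_assoc]
            rw [(by omega : k + 1 + m = k + (m + 1))]

lemma chunk (ws : List String) (k : Nat) (hk : k % 30 = 0) (hne : ws ≠ []) :
    pvG k ws = pvSep k ++ (PySem.Str.join ", " (ws.take 30) ++ pvG (k + 30) (ws.drop 30)) := by
  cases ws with
  | nil => exact absurd rfl hne
  | cons w t =>
      rw [pvG, run 29 t (k + 1) (by omega) (by omega)]
      rw [show (30 : Nat) = 29 + 1 by norm_num, List.take_succ_cons, List.drop_succ_cons]
      rw [join_comma, (by omega : k + 1 + 29 = k + 30)]
      simp [String.append_assoc]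

lemma aux2 (n : Nat) : ∀ (ws : List String), ws.length ≤ n → ws ≠ [] → ∀ k : Nat, k % 30 = 0 →
    pvG k ws = pvSep k ++ PySem.Str.join ",\n    " (pvLines ws) := by
  induction n with
  | zero => intro ws hlen hne; cases ws with
      | nil => exact absurd rfl hne
      | cons w t => simp at hlen
  | succ n ih =>
      intro ws hlen hne k hk
      cases ws with
      | nil => exact absurd rfl hne
      | cons w t =>
          rw [chunk (w :: t) k hk hne, pvLines]
          by_cases hr : (w :: t).drop 30 = []
          · rw [hr]
            simp [pvG, pvLines, join_singleton']
          · have hlen' : ((w :: t).drop 30).length ≤ n := by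
              simp [List.length_drop] at *; omega
            rw [ih _ hlen' hr (k + 30) (by omega)]
            have hsep : pvSep (k + 30) = ",\n    " := by
              unfold pvSep; rw [if_neg (by omega), if_pos (by omega)]
            cases hdl : pvLines ((w :: t).drop 30) with
            | nil =>
                cases h' : (w:: t).drop 30 with
                | nil => exact absurd h' hr
                | cons a b => rw [h'] at hdl; simp [pvLines] at hdl
            | cons l ls =>
                rw [join_cons_cons', hsep]

lemma aux1r (n : Nat) : ∀ (ws : List String), ws.length ≤ n →
    (List.range ((ws.length + 29) / 30)).map
      (fun k => PySem.Str.join ", " ((ws.drop (30 * k)).take 30)) = pvLines ws := by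
  induction n with
  | zero =>
      intro ws hlen
      have : ws = [] := by cases ws <;> simp_all
      subst this
      simp [pvLines]
  | succ n ih =>
      intro ws hlen
      cases ws with
      | nil => simp [pvLines]
      | cons w t =>
          have hc : ((w :: t).length + 29) / 30 = (((w :: t).drop 30).length + 29) / 30 + 1 := by
            simp [List.length_drop]
            omega
          rw [hc, List.range_succ_eq_map, List.map_cons, List.map_map]
          have htail : (List.range ((((w :: t).drop 30).length + 29) / 30)).map
              ((fun k => PySem.Str.join ", " (((w :: t).drop (30 * k)).take 30)) ∘ Nat.succ) =
              pvLines ((w :: t).drop 30) := by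
            rw [← ih ((w :: t).drop 30) (by simp [List.length_drop] at *; omega)]
            apply List.map_congr_left
            intro k _
            simp only [Function.comp_apply]
            congr 2
            rw [List.drop_drop]
            congr 1
            omega
          rw [htail]
          conv_rhs => rw [pvLines]
          simp

lemma aux1 (ws : List String) :
    ((PySem.List.pyRange 0 (ws.length : Int) 30).map
      (fun i => PySem.Str.join ", " (PySem.List.slice ws (some i) (some (i + 30))))) = pvLines ws := by
  rw [PySem.List.pyRange_of_pos _ _ (by norm_num : (0:Int) < 30), List.map_map]
  have hc : (if (0 : Int) < (ws.length : Int) then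
      (((ws.length : Int) - 0 + 30 - 1) / 30).toNat else 0) = (ws.length + 29) / 30 := by
    cases ws with
    | nil => simp
    | cons w t => rw [if_pos (by exact_mod_cast t.length.succ_pos)]; omega
  rw [hc, ← aux1r ws.length ws le_rfl]
  apply List.map_congr_left
  intro k _
  simp only [Function.comp_apply]
  have h1 : (0 : Int) + 30 * (k : Int) = ((30 * k : Nat) : Int) := by push_cast; ring
  have h2 : ((30 * k : Nat) : Int) + 30 = ((30 * k : Nat) : Int) + ((30 : Nat) : Int) := by norm_num
  rw [h1, h2, PySem.List.slice_natCast_add]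

-- ===== VERDICT (by name: the statement is the Claim_ definition above) =====
theorem get_wire_declaration_str_spec : Claim_equal_get_wire_declaration_str := by
  intro ws _
  unfold Spec_get_wire_declaration_str get_wire_declaration_str get_wire_declaration_str_alt
  cases ws with
  | nil => simp
  | cons w t =>
      rw [if_pos (by simp), if_neg (by simp)]
      rw [aux1 (w :: t)]
      have hB := foldB (w :: t) 0 ""
      simp only [Nat.cast_zero] at hB
      rw [hB, String.empty_append]
      rw [aux2 (w :: t).length (w :: t) le_rfl (by simp) 0 rfl]
      simp [pvSep]
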